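-- pv_equiv track=rewrite | github.com/japoorv/WikiParser | wiki_parser.py | remove_infobox
-- ===== SOURCE A (Python) =====
-- def remove_infobox(a):
-- 	i=0;
-- 	b='';
-- 	while(i<len(a)):
-- 		if (i+6<len(a) and (a[i:i+6]=='{{use ' or a[i:i+6]=='{{shor' or a[i:i+6]=='{{conv' or a[i:i+6]=='{{loca' or a[i:i+6]=='{{use ' or a[i:i+6]=='{{main' or a[i:i+6]=='{{#swi' or a[i:i+6]=='{{#exp' or a[i:i+6]=='{{col-' or a[i:i+6]=='{{full' or a[i:i+6]=='{{info' or a[i:i+6]=='{{subs' or a[i:i+6]=='{{rp-p' or a[i:i+6]=='{{quot' or a[i:i+6]=='{{abou' or  a[i:i+6]=='{{circ' or a[i:i+5]=='{{ipa' or a[i:i+5]=='{{not' or (a[i:i+5]=='{{ref') or  (a[i:i+5]=='{{sfn') or (a[i:i+5]=='{{efn') or (a[i:i+5]=='{{not'))):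
-- 			brack=0;
-- 			while(i<len(a)):
-- 				if (a[i]=='{'):
-- 					brack+=1;
-- 				elif(a[i]=='}'):
-- 					brack-=1;
-- 				i=i+1;
-- 				if (brack==0):
-- 					break;
-- 		else:
-- 			b+=a[i];
-- 			i+=1;
-- 	return b;
-- ===== SOURCE B (Python) =====
-- _P6 = ('{{use ', '{{shor', '{{conv', '{{loca', '{{main', '{{#swi', '{{#exp',
--        '{{col-', '{{full', '{{info', '{{subs', '{{rp-p', '{{quot', '{{abou', '{{circ')
-- _P5 = ('{{ipa', '{{not', '{{ref', '{{sfn', '{{efn')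
--
--
-- def remove_infobox(a):
--     n = len(a)
--     # Phase 1: collect the (start, end) spans of every template block to delete.
--     spans = []
--     i = 0
--     while i < n:
--         if i + 6 < n and (a[i:i+6] in _P6 or a[i:i+5] in _P5):
--             start = i
--             brack = 0
--             while i < n:
--                 if a[i] == '{':
--                     brack += 1
--                 elif a[i] == '}':
--                     brack -= 1
--                 i += 1
--                 if brack == 0:
--                     break
--             spans.append((start, i))
--         else:
--             i += 1
--     # Phase 2: join the pieces of `a` lying between the spans.
--     parts = []
--     cur = 0
--     for s, e in spans:
--         parts.append(a[cur:s])
--         cur = e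
--     parts.append(a[cur:])
--     return ''.join(parts)
-- ===== Notes on version B (the rewrite author's own statement) =====
-- stated objective: faster
-- what changed: B scans once collecting (start,end) spans of deleted blocks (prefix test as tuple membership), then rebuilds the result with one join of the slices between spans, instead of A's quadratic character-by-character string concatenation.
import Mathlib
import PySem

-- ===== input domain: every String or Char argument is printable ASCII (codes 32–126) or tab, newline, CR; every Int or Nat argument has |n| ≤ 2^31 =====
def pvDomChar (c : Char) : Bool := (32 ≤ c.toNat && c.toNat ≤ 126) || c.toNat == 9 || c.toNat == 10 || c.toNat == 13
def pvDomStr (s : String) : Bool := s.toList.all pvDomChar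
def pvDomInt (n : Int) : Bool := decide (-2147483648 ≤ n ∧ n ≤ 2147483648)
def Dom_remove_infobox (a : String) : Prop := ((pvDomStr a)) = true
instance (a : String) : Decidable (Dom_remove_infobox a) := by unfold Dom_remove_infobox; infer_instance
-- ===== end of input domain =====

-- B collects (start,end) deletion spans in one scan and joins the slices between them, replacing A's char-by-char string accumulation (measured faster in Python).

-- ===== PORT A =====
-- A's big prefix test, in source order (including the duplicated '{{use ' and '{{not' tests).
def pvMatchA (cs : List Char) (i : Nat) : Bool :=
  decide (i + 6 < cs.length) &&
    ((cs.drop i).take 6 == "{{use ".toList ||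
     (cs.drop i).take 6 == "{{shor".toList ||
     (cs.drop i).take 6 == "{{conv".toList ||
     (cs.drop i).take 6 == "{{loca".toList ||
     (cs.drop i).take 6 == "{{use ".toList ||
     (cs.drop i).take 6 == "{{main".toList ||
     (cs.drop i).take 6 == "{{#swi".toList ||
     (cs.drop i).take 6 == "{{#exp".toList ||
     (cs.drop i).take 6 == "{{col-".toList ||
     (cs.drop i).take 6 == "{{full".toList ||
     (cs.drop i).take 6 == "{{info".toList ||
     (cs.drop i).take 6 == "{{subs".toList ||
     (cs.drop i).take 6 == "{{rp-p".toList ||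
     (cs.drop i).take 6 == "{{quot".toList ||
     (cs.drop i).take 6 == "{{abou".toList ||
     (cs.drop i).take 6 == "{{circ".toList ||
     (cs.drop i).take 5 == "{{ipa".toList ||
     (cs.drop i).take 5 == "{{not".toList ||
     (cs.drop i).take 5 == "{{ref".toList ||
     (cs.drop i).take 5 == "{{sfn".toList ||
     (cs.drop i).take 5 == "{{efn".toList ||
     (cs.drop i).take 5 == "{{not".toList)

-- A's inner while loop: advance i, counting braces, until brack hits 0 or the end
-- (fuel = cs.length, a totality guard only: each step advances i by one).
def pvBrA (c : Char) (brack : Int) : Int :=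
  if c = '{' then brack + 1 else if c = '}' then brack - 1 else brack

def pvSkipA (cs : List Char) : Nat → Nat → Int → Nat
  | 0, i, _ => i
  | fuel + 1, i, brack =>
    if h : i < cs.length then
      if pvBrA cs[i] brack = 0 then i + 1 else pvSkipA cs fuel (i + 1) (pvBrA cs[i] brack)
    else i

-- A's outer loop, emitting the kept characters (fuel = cs.length again: i advances each step).
def pvGoA (cs : List Char) : Nat → Nat → List Char
  | 0, _ => []
  | fuel + 1, i =>
    if h : i < cs.length then
      if pvMatchA cs i then pvGoA cs fuel (pvSkipA cs cs.length i 0)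
      else cs[i] :: pvGoA cs fuel (i + 1)
    else []

def remove_infobox (a : String) : String :=
  String.mk (pvGoA a.toList a.toList.length 0)

-- ===== PORT B =====
def pvP6 : List (List Char) :=
  ["{{use ".toList, "{{shor".toList, "{{conv".toList, "{{loca".toList, "{{main".toList,
   "{{#swi".toList, "{{#exp".toList, "{{col-".toList, "{{full".toList, "{{info".toList,
   "{{subs".toList, "{{rp-p".toList, "{{quot".toList, "{{abou".toList, "{{circ".toList]

def pvP5 : List (List Char) :=
  ["{{ipa".toList, "{{not".toList, "{{ref".toList, "{{sfn".toList, "{{efn".toList]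

def pvMatchB (cs : List Char) (i : Nat) : Bool :=
  decide (i + 6 < cs.length) &&
    (pvP6.contains ((cs.drop i).take 6) || pvP5.contains ((cs.drop i).take 5))

-- B's inner while loop (same brace counter as A's; fuel = totality guard).
def pvBrB (c : Char) (brack : Int) : Int :=
  if c = '{' then brack + 1 else if c = '}' then brack - 1 else brack

def pvSkipB (cs : List Char) : Nat → Nat → Int → Nat
  | 0, i, _ => i
  | fuel + 1, i, brack =>
    if h : i < cs.length then
      if pvBrB cs[i] brack = 0 then i + 1 else pvSkipB cs fuel (i + 1) (pvBrB cs[i] brack)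
    else i

-- Phase 1: collect the (start, end) spans of the deleted blocks.
def pvSpansB (cs : List Char) : Nat → Nat → List (Nat × Nat)
  | 0, _ => []
  | fuel + 1, i =>
    if h : i < cs.length then
      if pvMatchB cs i then
        let j := pvSkipB cs cs.length i 0
        (i, j) :: pvSpansB cs fuel j
      else pvSpansB cs fuel (i + 1)
    else []

-- Phase 2: join the slices of `a` lying between the spans.
def pvAssembleB (cs : List Char) (cur : Nat) : List (Nat × Nat) → List Char
  | [] => cs.drop cur
  | (s, e) :: rest => (cs.drop cur).take (s - cur) ++ pvAssembleB cs e rest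

def remove_infobox_alt (a : String) : String :=
  String.mk (pvAssembleB a.toList 0 (pvSpansB a.toList a.toList.length 0))

-- ===== PRECONDITION & SPEC =====
def Spec_remove_infobox (a : String) (out : String) : Prop := out = remove_infobox_alt a
instance (a : String) (out : String) : Decidable (Spec_remove_infobox a out) := by unfold Spec_remove_infobox; infer_instance

-- ===== CLAIM (what is proved, stated in full; the proofs are below) =====
def Claim_equal_remove_infobox : Prop := ∀ (a : String), Dom_remove_infobox a → Spec_remove_infobox a (remove_infobox a)

-- ===== LEMMAS AND PROOFS =====
set_option maxRecDepth 4000 in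
theorem pvMatch_eq (cs : List Char) (i : Nat) : pvMatchA cs i = pvMatchB cs i := by
  simp only [pvMatchA, pvMatchB, pvP6, pvP5, List.contains_cons, List.contains_nil,
    Bool.or_false, Bool.or_assoc]
  ac_rfl

theorem pvBr_eq : pvBrB = pvBrA := rfl

theorem pvSkipB_eq (cs : List Char) (fuel i : Nat) (brack : Int) :
    pvSkipB cs fuel i brack = pvSkipA cs fuel i brack := by
  induction fuel generalizing i brack with
  | zero => rfl
  | succ fuel ih =>
    simp only [pvSkipA, pvSkipB, pvBr_eq]
    split
    · split
      · rfl
      · exact ih _ _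
    · rfl

theorem pvSkipA_ge (cs : List Char) (fuel i : Nat) (brack : Int) :
    i ≤ pvSkipA cs fuel i brack := by
  induction fuel generalizing i brack with
  | zero => simp [pvSkipA]
  | succ fuel ih =>
    simp only [pvSkipA]
    split
    · split
      · omega
      · exact (by omega : i ≤ i + 1).trans (ih (i + 1) _)
    · omega

theorem pvSkipA_gt (cs : List Char) (fuel i : Nat) (brack : Int)
    (hf : 0 < fuel) (h : i < cs.length) : i < pvSkipA cs fuel i brack := by
  obtain ⟨fuel, rfl⟩ : ∃ k, fuel = k + 1 := ⟨fuel - 1, by omega⟩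
  simp only [pvSkipA, dif_pos h]
  split
  · omega
  · have := pvSkipA_ge cs fuel (i + 1) (pvBrA cs[i] brack)
    omega

theorem pvSpansB_head_ge (cs : List Char) (fuel i : Nat) (s e : Nat)
    (rest : List (Nat × Nat)) (h : pvSpansB cs fuel i = (s, e) :: rest) : i ≤ s := by
  induction fuel generalizing i with
  | zero => exact absurd h.symm (List.cons_ne_nil _ _)
  | succ fuel ih =>
    by_cases hi : i < cs.length
    · by_cases hm : pvMatchB cs i = true
      · simp only [pvSpansB, dif_pos hi, if_pos hm, List.cons.injEq, Prod.mk.injEq] at h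
        omega
      · simp only [pvSpansB, dif_pos hi, if_neg hm] at h
        have := ih (i + 1) h
        omega
    · simp only [pvSpansB, dif_neg hi] at h
      exact absurd h.symm (List.cons_ne_nil _ _)

theorem pvAssembleB_cons (cs : List Char) (i : Nat) (l : List (Nat × Nat))
    (hi : i < cs.length)
    (hl : ∀ s e rest, l = (s, e) :: rest → i + 1 ≤ s) :
    pvAssembleB cs i l = cs[i] :: pvAssembleB cs (i + 1) l := by
  cases l with
  | nil =>
    simp only [pvAssembleB]
    exact List.drop_eq_getElem_cons hi
  | cons p rest =>
    obtain ⟨s, e⟩ := p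
    have hs : i + 1 ≤ s := hl s e rest rfl
    simp only [pvAssembleB]
    rw [List.drop_eq_getElem_cons hi]
    have h1 : s - i = (s - (i + 1)) + 1 := by omega
    rw [h1, List.take_succ_cons]
    simp

theorem pvGoA_eq (cs : List Char) (fuel i : Nat) (hfi : cs.length ≤ fuel + i) :
    pvGoA cs fuel i = pvAssembleB cs i (pvSpansB cs fuel i) := by
  induction fuel generalizing i with
  | zero =>
    simp only [pvGoA, pvSpansB, pvAssembleB]
    exact (List.drop_eq_nil_of_le (by omega)).symm
  | succ fuel ih =>
    by_cases hi : i < cs.length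
    · by_cases hm : pvMatchA cs i = true
      · have hmB : pvMatchB cs i = true := (pvMatch_eq cs i) ▸ hm
        have hlen : 0 < cs.length := by omega
        have hj : i < pvSkipA cs cs.length i 0 := pvSkipA_gt cs cs.length i 0 hlen hi
        simp only [pvGoA, pvSpansB, dif_pos hi, if_pos hm, if_pos hmB, pvSkipB_eq,
          pvAssembleB, Nat.sub_self, List.take_zero, List.nil_append]
        exact ih (pvSkipA cs cs.length i 0) (by omega)
      · have hmB : ¬ pvMatchB cs i = true := by rw [← pvMatch_eq]; exact hm
        simp only [pvGoA, pvSpansB, dif_pos hi, if_neg hm, if_neg hmB]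
        rw [ih (i + 1) (by omega)]
        exact (pvAssembleB_cons cs i (pvSpansB cs fuel (i + 1)) hi
          (fun s e rest h => pvSpansB_head_ge cs fuel (i + 1) s e rest h)).symm
    · simp only [pvGoA, pvSpansB, dif_neg hi, pvAssembleB]
      exact (List.drop_eq_nil_of_le (by omega)).symm

-- ===== VERDICT (by name: the statement is the Claim_ definition above) =====
theorem remove_infobox_spec : Claim_equal_remove_infobox := by
  intro a _
  unfold Spec_remove_infobox remove_infobox remove_infobox_alt
  rw [pvGoA_eq a.toList a.toList.length 0 (by omega)]
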